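-- pv_equiv track=rewrite | github.com/rubening/MCP-Servers | business-tools/mcp-project-optimizer/server.py | _split_long_section
-- ===== SOURCE A (Python) =====
-- from typing import Any, Dict, List, Optional
--
-- def _split_long_section(section_lines: List[str]) -> List[str]:
--     """Split a long section into smaller subsections"""
--     if len(section_lines) <= 1:
--         return section_lines
--
--     header = section_lines[0]
--     content = section_lines[1:]
--
--     # Simple split: add subsection headers at paragraph breaks
--     result = [header]
--     current_subsection = []
--     word_count = 0
--
--     for line in content:
--         if line.strip() == '' and word_count > 300:  # Paragraph break
--             if current_subsection:
--                 # Add subsection header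
--                 subsection_header = header.replace('#', '##', 1) + f" - Part {len(result)}"
--                 result.append('')
--                 result.append(subsection_header)
--                 result.extend(current_subsection)
--                 current_subsection = []
--                 word_count = 0
--
--         current_subsection.append(line)
--         word_count += len(line.split())
--
--     # Add remaining content
--     result.extend(current_subsection)
--     return result
-- ===== SOURCE B (Python) =====
-- def _split_long_section(section_lines):
--     if len(section_lines) <= 1:
--         return section_lines
--     header = section_lines[0]
--     # Pass 1: cut the content into chunks at qualifying paragraph breaks
--     # (the trigger blank line starts the next chunk, per-chunk word count).
--     chunks = []
--     cur = []
--     wc = 0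
--     for line in section_lines[1:]:
--         if line.strip() == '' and wc > 300 and cur:
--             chunks.append(cur)
--             cur = [line]
--             wc = len(line.split())
--         else:
--             cur.append(line)
--             wc += len(line.split())
--     # Pass 2: emit every closed chunk with a blank line and a Part header
--     # (numbered by the running result length), then the final chunk bare.
--     result = [header]
--     for chunk in chunks:
--         sub = header.replace('#', '##', 1) + f" - Part {len(result)}"
--         result.append('')
--         result.append(sub)
--         result.extend(chunk)
--     result.extend(cur)
--     return result
-- ===== Notes on version B (the rewrite author's own statement) =====
-- stated objective: alternative
-- what changed: A interleaves chunking and header emission in one fused loop with three mutable state variables; B separates the task into a chunking pass (cut content at blank lines once 300 words accumulate, the blank line opening the next chunk) and an emission pass that writes each closed chunk behind a Part header numbered by the running result length, with the final chunk appended bare.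
import Mathlib
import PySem

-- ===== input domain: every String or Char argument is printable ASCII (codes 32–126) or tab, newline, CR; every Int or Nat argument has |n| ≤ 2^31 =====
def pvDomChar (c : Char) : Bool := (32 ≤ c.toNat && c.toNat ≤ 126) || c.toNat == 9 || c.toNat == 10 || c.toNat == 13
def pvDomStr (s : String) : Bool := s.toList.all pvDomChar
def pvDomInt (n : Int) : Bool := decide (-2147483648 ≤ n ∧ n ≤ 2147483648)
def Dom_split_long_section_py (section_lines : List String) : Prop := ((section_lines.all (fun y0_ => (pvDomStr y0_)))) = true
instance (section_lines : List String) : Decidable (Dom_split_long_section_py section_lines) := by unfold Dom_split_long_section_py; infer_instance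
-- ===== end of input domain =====

-- B re-decomposes A's single stateful loop into two passes (chunk the content, then emit numbered
-- subsection headers); objective: simpler/alternative decomposition, no speed claim.

-- shared helpers (the same Python expressions occur verbatim in both A and B)

-- header.replace('#', '##', 1): replace the FIRST occurrence of '#' by '##'; exact for this
-- one-character pattern (ported by hand because PySem.Str.replace has no count parameter).
def pvReplaceFirstHash : List Char → List Char
  | [] => []
  | c :: cs => if c = '#' then '#' :: '#' :: cs else c :: pvReplaceFirstHash cs

-- header.replace('#','##',1) + f" - Part {n}"
def pvSubHeader (header : String) (n : Nat) : String :=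
  String.ofList (pvReplaceFirstHash header.toList ++ " - Part ".toList ++ (PySem.Int.toStr (n : Int)).toList)

-- len(line.split())
def pvWordsOf (line : String) : Nat := (PySem.Str.split₀ line).length

-- line.strip() == ''
def pvIsBlank (line : String) : Bool := PySem.Str.strip line == ""

-- ===== PORT A =====
-- the for-loop of A over (result, current_subsection, word_count)
def pvLoopA (header : String) : List String → List String → List String → Nat → List String
  | [], res, cur, _ => res ++ cur
  | line :: rest, res, cur, wc =>
    if pvIsBlank line = true ∧ 300 < wc then
      if cur ≠ [] then
        pvLoopA header rest (res ++ "" :: pvSubHeader header res.length :: cur) [line] (0 + pvWordsOf line)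
      else
        pvLoopA header rest res (cur ++ [line]) (wc + pvWordsOf line)
    else
      pvLoopA header rest res (cur ++ [line]) (wc + pvWordsOf line)

def split_long_section_py (section_lines : List String) : List String :=
  if section_lines.length ≤ 1 then section_lines
  else
    match section_lines with
    | [] => section_lines  -- unreachable under the guard
    | header :: content => pvLoopA header content [header] [] 0

-- ===== PORT B =====
-- pass 1: cut the content into chunks at qualifying paragraph breaks
def pvChunk : List String → List (List String) → List String → Nat → List (List String) × List String
  | [], chunks, cur, _ => (chunks, cur)
  | line :: rest, chunks, cur, wc =>
    if pvIsBlank line = true ∧ 300 < wc ∧ cur ≠ [] then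
      pvChunk rest (chunks ++ [cur]) [line] (pvWordsOf line)
    else
      pvChunk rest chunks (cur ++ [line]) (wc + pvWordsOf line)

-- pass 2: emit each closed chunk behind a blank line and a Part header numbered by len(result)
def pvEmit (header : String) (chunks : List (List String)) (acc : List String) : List String :=
  chunks.foldl (fun acc c => acc ++ "" :: pvSubHeader header acc.length :: c) acc

def split_long_section_py_alt (section_lines : List String) : List String :=
  if section_lines.length ≤ 1 then section_lines
  else
    match section_lines with
    | [] => section_lines  -- unreachable under the guard
    | header :: content =>
      let p := pvChunk content [] [] 0
      pvEmit header p.1 [header] ++ p.2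

-- ===== PRECONDITION & SPEC =====
def Spec_split_long_section_py (section_lines : List String) (out : List String) : Prop := out = split_long_section_py_alt section_lines
instance (section_lines : List String) (out : List String) : Decidable (Spec_split_long_section_py section_lines out) := by unfold Spec_split_long_section_py; infer_instance

-- ===== CLAIM (what is proved, stated in full; the proofs are below) =====
def Claim_equal_split_long_section_py : Prop := ∀ (section_lines : List String), Dom_split_long_section_py section_lines → Spec_split_long_section_py section_lines (split_long_section_py section_lines)

-- ===== LEMMAS AND PROOFS =====

-- the fused loop of A, run from the emitted form of B's pass-1 state, computes B's result
lemma pvLoop_eq (header : String) :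
    ∀ (lines : List String) (chunks : List (List String)) (cur : List String) (wc : Nat),
      pvLoopA header lines (pvEmit header chunks [header]) cur wc
        = pvEmit header (pvChunk lines chunks cur wc).1 [header] ++ (pvChunk lines chunks cur wc).2 := by
  intro lines
  induction lines with
  | nil => intro chunks cur wc; simp [pvLoopA, pvChunk]
  | cons line rest ih =>
    intro chunks cur wc
    by_cases h1 : pvIsBlank line = true ∧ 300 < wc
    · by_cases h2 : cur = []
      · subst h2
        simp [pvLoopA, pvChunk, h1, ih]
      · have hflush :
            pvEmit header chunks [header] ++ "" :: pvSubHeader header (pvEmit header chunks [header]).length :: cur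
              = pvEmit header (chunks ++ [cur]) [header] := by
          simp [pvEmit, List.foldl_append]
        rw [pvLoopA, pvChunk, if_pos h1, if_pos h2, if_pos ⟨h1.1, h1.2, h2⟩, hflush, ih]
        simp
    · have h1' : ¬ (pvIsBlank line = true ∧ 300 < wc ∧ cur ≠ []) := by tauto
      rw [pvLoopA, pvChunk, if_neg h1, if_neg h1', ih]

-- ===== VERDICT (by name: the statement is the Claim_ definition above) =====
theorem split_long_section_py_spec : Claim_equal_split_long_section_py := by
  intro section_lines _
  unfold Spec_split_long_section_py split_long_section_py split_long_section_py_alt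
  by_cases h : section_lines.length ≤ 1
  · simp [h]
  · match section_lines with
    | [] => simp at h
    | header :: content =>
      simp only [if_neg h]
      have := pvLoop_eq header content [] [] 0
      simpa [pvEmit] using this
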